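-- pv_equiv track=rewrite | github.com/GitMonsters/octotetrahedral-agi | core/primitives.py | p_sort_cols
-- ===== SOURCE A (Python) =====
-- from typing import List, Dict, Tuple, Optional, Callable, Any, Set
--
-- Grid = List[List[int]]
--
-- def p_sort_cols(grid: Grid) -> Grid:
--     """Sort each column by color value."""
--     rows, cols = len(grid), len(grid[0])
--     result = [row[:] for row in grid]
--     for c in range(cols):
--         col_vals = sorted(grid[r][c] for r in range(rows))
--         for r in range(rows):
--             result[r][c] = col_vals[r]
--     return result
-- ===== SOURCE B (Python) =====
-- def p_sort_cols(grid):
--     """Sort each column by color value.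
--
--     Recurses column by column: sort the leading column (the values row[0]),
--     peel it off, and recurse on the row tails; once the header row is
--     exhausted there are no columns left to sort, so the remaining cells are
--     returned unchanged.
--     """
--     if not grid[0]:
--         return [list(row) for row in grid]
--     first = sorted(row[0] for row in grid)
--     rest = p_sort_cols([row[1:] for row in grid])
--     return [[first[r]] + rest[r] for r in range(len(grid))]
-- ===== Notes on version B (the rewrite author's own statement) =====
-- stated objective: alternative
-- what changed: B replaces A's copy-the-grid-then-overwrite-each-column index loops by a functional recursion that sorts and peels off the leading column and recurses on the row tails, returning the leftover cells unchanged when the header row is exhausted; Pre_ excludes only the inputs where A raises IndexError (empty grid, or a row shorter than the first).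
import Mathlib
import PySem

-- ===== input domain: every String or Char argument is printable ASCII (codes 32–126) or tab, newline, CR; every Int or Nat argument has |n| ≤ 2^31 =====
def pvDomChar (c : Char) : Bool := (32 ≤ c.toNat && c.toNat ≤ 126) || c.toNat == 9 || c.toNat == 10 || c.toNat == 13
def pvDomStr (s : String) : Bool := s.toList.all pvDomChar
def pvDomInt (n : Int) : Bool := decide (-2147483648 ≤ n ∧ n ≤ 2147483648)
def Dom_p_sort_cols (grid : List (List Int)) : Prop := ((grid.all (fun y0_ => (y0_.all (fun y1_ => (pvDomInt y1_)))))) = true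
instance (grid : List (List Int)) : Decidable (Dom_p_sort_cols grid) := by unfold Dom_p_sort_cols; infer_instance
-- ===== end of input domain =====

-- B sorts the grid by a functional recursion that sorts and peels off the leading column and
-- recurses on the row tails; A copies the grid and overwrites it column by column in place.
-- Return-value equivalence only: A mutates its local copy, neither mutates the caller's grid.

-- ===== PORT A =====
def p_sort_cols (grid : List (List Int)) : List (List Int) :=
  let rows := grid.length
  let cols := (grid.headD []).length   -- len(grid[0]); Python raises IndexError on [] — excluded by Pre_
  let result := grid                   -- [row[:] for row in grid]: a fresh copy (identity on immutable Lean lists)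
  (List.range cols).foldl (fun res c =>
    let colVals := PySem.List.sorted
      ((List.range rows).map (fun r => (grid.getD r []).getD c 0)) (fun x => x) false
    -- grid[r][c]: in range for every admitted input (Pre_ excludes rows shorter than the first)
    (List.range rows).foldl (fun res2 r =>
      res2.modify r (fun row => row.set c (colVals.getD r 0))) res) result

-- ===== PORT B =====
def p_sort_cols_alt (grid : List (List Int)) : List (List Int) :=
  if (grid.headD []).isEmpty then       -- 'if not grid[0]' (grid[0] on [] raises — excluded by Pre_)
    grid.map (fun row => row)           -- [list(row) for row in grid]: fresh copies (identity on immutable Lean lists)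
  else
    let first := PySem.List.sorted (grid.map (fun row => row.headD 0)) (fun x => x) false
    -- row[0]: in range for every admitted input (Pre_ excludes rows shorter than the first)
    let rest := p_sort_cols_alt (grid.map (fun row => PySem.List.slice row (some 1) none))
    (List.range grid.length).map (fun r => first.getD r 0 :: rest.getD r [])
termination_by (grid.headD []).length
decreasing_by
  cases grid with
  | nil => simp_all
  | cons h t =>
    simp only [List.headD_cons, PySem.List.slice_from_one] at *
    cases h <;> simp_all

-- ===== PRECONDITION & SPEC =====
-- Pre_ excludes exactly the inputs on which Python A raises IndexError: the empty grid
-- (len(grid[0])) and grids with a row shorter than the first row (grid[r][c] out of range).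
def Pre_p_sort_cols (grid : List (List Int)) : Prop :=
  grid ≠ [] ∧ ∀ row ∈ grid, (grid.headD []).length ≤ row.length
instance (grid : List (List Int)) : Decidable (Pre_p_sort_cols grid) := by
  unfold Pre_p_sort_cols; infer_instance
def pvWitness_p_sort_cols : List (List Int) := [[2, 1], [1, 3]]

def Spec_p_sort_cols (grid : List (List Int)) (out : List (List Int)) : Prop := out = p_sort_cols_alt grid
instance (grid : List (List Int)) (out : List (List Int)) : Decidable (Spec_p_sort_cols grid out) := by unfold Spec_p_sort_cols; infer_instance

-- ===== CLAIM (what is proved, stated in full; the proofs are below) =====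
def Claim_equal_p_sort_cols : Prop := ∀ (grid : List (List Int)), Dom_p_sort_cols grid → Pre_p_sort_cols grid → Spec_p_sort_cols grid (p_sort_cols grid)

-- ===== LEMMAS AND PROOFS =====

-- value at row r of the sorted column c of grid
def colv (grid : List (List Int)) (c r : Nat) : Int :=
  (PySem.List.sorted ((List.range grid.length).map (fun r => (grid.getD r []).getD c 0))
    (fun x => x) false).getD r 0

-- the common normal form both ports are reduced to: row r is the first `cols` sorted-column
-- values followed by the untouched tail of the original row
def normalForm (grid : List (List Int)) (cols : Nat) : List (List Int) :=
  (List.range grid.length).map (fun r =>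
    (List.range cols).map (fun c => colv grid c r) ++ (grid.getD r []).drop cols)

-- a fold of `modify (r+1)` over a cons keeps the head
theorem foldl_modify_shift {α : Type} (l : List Nat) (g : Nat → α → α) (y : α) (ys : List α) :
    l.foldl (fun a r => a.modify (r + 1) (g r)) (y :: ys)
      = y :: l.foldl (fun a r => a.modify r (g r)) ys := by
  induction l generalizing ys with
  | nil => rfl
  | cons r t ih =>
    rw [List.foldl_cons, List.foldl_cons, List.modify_succ_cons, ih]

-- A's inner loop (result[r][c] = …) is a mapIdx over the rows
theorem foldl_modify_range {α : Type} (res : List α) (f : Nat → α → α) :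
    (List.range res.length).foldl (fun a r => a.modify r (f r)) res = res.mapIdx f := by
  induction res generalizing f with
  | nil => rfl
  | cons x xs ih =>
    rw [List.length_cons, List.range_succ_eq_map, List.foldl_cons]
    rw [List.foldl_map]
    simp only [Nat.succ_eq_add_one]
    rw [List.modify_zero_cons]
    rw [foldl_modify_shift (List.range xs.length) (fun r => f (r + 1)) (f 0 x) xs,
        ih (fun i => f (i + 1)), List.mapIdx_cons]

-- left-to-right in-place sets on a long-enough row build prefix ++ untouched tail
theorem foldl_set_range (v : Nat → Int) :
    ∀ (k : Nat) (row : List Int), k ≤ row.length →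
      (List.range k).foldl (fun row c => row.set c (v c)) row
        = (List.range k).map v ++ row.drop k := by
  intro k
  induction k with
  | zero => intro row _; simp
  | succ k ih =>
    intro row hk
    rw [List.range_succ, List.foldl_append, List.map_append, List.foldl_cons, List.foldl_nil]
    rw [ih row (Nat.le_of_succ_le hk)]
    have hklt : k < row.length := hk
    have hlen : ((List.range k).map v).length = k := by simp
    rw [List.set_append_right _ _ (by omega)]
    have hd : (row.drop k).set (k - ((List.range k).map v).length) (v k)
        = v k :: row.drop (k + 1) := by
      rw [hlen, Nat.sub_self, List.drop_eq_getElem_cons hklt, List.set_cons_zero]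
    rw [hd]
    simp

-- A's whole loop nest as a mapIdx of per-row set-folds
theorem outer_shape (grid : List (List Int)) (v : Nat → Nat → Int) (cols : Nat) :
    (List.range cols).foldl (fun res c =>
        (List.range grid.length).foldl (fun res2 r =>
          res2.modify r (fun row => row.set c (v c r))) res) grid
      = grid.mapIdx (fun r row => (List.range cols).foldl (fun row c => row.set c (v c r)) row) := by
  induction cols with
  | zero =>
    simp only [List.range_zero, List.foldl_nil]
    apply List.ext_getElem <;> simp
  | succ cols ih =>
    rw [List.range_succ, List.foldl_append, List.foldl_cons, List.foldl_nil, ih]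
    have hlen : (grid.mapIdx (fun r row =>
        (List.range cols).foldl (fun row c => row.set c (v c r)) row)).length = grid.length := by
      simp
    rw [← hlen, foldl_modify_range, List.mapIdx_mapIdx]
    apply List.ext_getElem <;> simp

-- A = the common normal form whenever no row is shorter than the first
theorem A_char (grid : List (List Int))
    (hlen : ∀ row ∈ grid, (grid.headD []).length ≤ row.length) :
    p_sort_cols grid = normalForm grid (grid.headD []).length := by
  unfold p_sort_cols normalForm
  simp only []
  have hsh := outer_shape grid (fun c r => colv grid c r) (grid.headD []).length
  simp only [colv] at hsh
  rw [hsh]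
  apply List.ext_getElem
  · simp
  · intro r h1 h2
    have hr : r < grid.length := by simpa using h1
    simp only [List.getElem_mapIdx, List.getElem_map, List.getElem_range]
    have hre : (grid.headD []).length ≤ grid[r].length := hlen _ (List.getElem_mem hr)
    rw [foldl_set_range (fun c =>
      (PySem.List.sorted ((List.range grid.length).map (fun r => (grid.getD r []).getD c 0))
        (fun x => x) false).getD r 0) _ grid[r] hre]
    rw [← List.getD_eq_getElem grid [] hr]
    simp [colv]

-- dropping after tail is dropping one more
theorem drop_tail' (l : List Int) (n : Nat) : l.tail.drop n = l.drop (n + 1) := by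
  cases l <;> simp

-- tail shifts getD by one
theorem tail_getD (l : List Int) (c : Nat) : l.tail.getD c 0 = l.getD (c + 1) 0 := by
  cases l <;> simp

-- a map over a list rewritten as a map over its index range
theorem map_eq_map_range {α : Type} (l : List (List Int)) (f : List Int → α) :
    l.map f = (List.range l.length).map (fun r => f (l.getD r [])) := by
  apply List.ext_getElem
  · simp
  · intro i h1 h2
    have hi : i < l.length := by simpa using h1
    simp [List.getD, List.getElem?_eq_getElem hi]

-- getD into the mapped tails is the tail of getD (for an in-range index)
theorem getD_map_tail (grid : List (List Int)) (j : Nat) (hj : j < grid.length) :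
    (grid.map List.tail).getD j [] = (grid.getD j []).tail := by
  rw [List.getD_eq_getElem _ _ (show j < (grid.map List.tail).length by simpa using hj),
      List.getElem_map, ← List.getD_eq_getElem _ _ hj]

-- B = the common normal form whenever no row is shorter than the first
theorem B_char : ∀ (cols : Nat) (grid : List (List Int)), grid ≠ [] →
    (grid.headD []).length = cols → (∀ row ∈ grid, cols ≤ row.length) →
    p_sort_cols_alt grid = normalForm grid cols := by
  intro cols
  induction cols with
  | zero =>
    intro grid _ hh0 _
    rw [p_sort_cols_alt]
    have hh : (grid.headD []).isEmpty = true := by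
      simpa [List.isEmpty_iff] using List.eq_nil_of_length_eq_zero hh0
    rw [if_pos hh]
    unfold normalForm
    simp [map_eq_map_range grid (fun row => row)]
  | succ cols ih =>
    intro grid hne hh0 hlen
    have hh : (grid.headD []).isEmpty = false := by
      cases hhead : grid.headD [] with
      | nil => rw [hhead] at hh0; simp at hh0
      | cons a as => rfl
    rw [p_sort_cols_alt, if_neg (by rw [hh]; exact Bool.false_ne_true)]
    simp only [PySem.List.slice_from_one]
    set grid' := grid.map List.tail with hgrid'
    have hlg : grid'.length = grid.length := by simp [hgrid']
    have hne' : grid' ≠ [] := by simp [hgrid', hne]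
    have hh0' : (grid'.headD []).length = cols := by
      obtain ⟨h0, t0, hg⟩ := List.exists_cons_of_ne_nil hne
      rw [hgrid', hg, List.map_cons, List.headD_cons, List.length_tail]
      rw [hg, List.headD_cons] at hh0
      omega
    have hlen' : ∀ row ∈ grid', cols ≤ row.length := by
      intro row hrow
      obtain ⟨row0, hrow0, rfl⟩ := List.mem_map.mp hrow
      have := hlen row0 hrow0
      simp only [List.length_tail]
      omega
    rw [ih grid' hne' hh0' hlen']
    unfold normalForm
    rw [hlg]
    apply List.ext_getElem
    · simp
    · intro r h1 h2
      have hr : r < grid.length := by simpa using h1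
      simp only [List.getElem_map, List.getElem_range]
      rw [PySem.List.getD_map_range _ _ r [] hr]
      rw [List.range_succ_eq_map]
      simp only [List.map_cons, List.map_map, List.cons_append]
      congr 1
      · -- head: sorted first column = colv grid 0 r
        have hcol : grid.map (fun row => row.headD 0)
            = (List.range grid.length).map (fun i => (grid.getD i []).getD 0 0) := by
          rw [map_eq_map_range grid (fun row => row.headD 0)]
          apply List.map_congr_left
          intro i _
          cases hgi : grid.getD i [] <;> simp
        rw [hcol]
        rfl
      · -- tail: columns of grid' are columns c+1 of grid; leftover tail shifts by one
        congr 1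
        · apply List.map_congr_left
          intro c _
          simp only [Function.comp]
          unfold colv
          rw [hlg]
          congr 2
          apply List.map_congr_left
          intro j hj
          have hjl : j < grid.length := List.mem_range.mp hj
          rw [hgrid', getD_map_tail grid j hjl]
          exact tail_getD (grid.getD j []) c
        · rw [hgrid', getD_map_tail grid r hr]
          exact drop_tail' (grid.getD r []) cols

-- ===== VERDICT (by name: the statement is the Claim_ definition above) =====
theorem p_sort_cols_spec : Claim_equal_p_sort_cols := by
  intro grid _ hpre
  obtain ⟨hne, hlen⟩ := hpre
  unfold Spec_p_sort_cols
  rw [A_char grid hlen, B_char (grid.headD []).length grid hne rfl hlen]
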